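-- pv_equiv track=rewrite | github.com/prafulnair/LeetCode-Tracker | all_division_with_highest_score_of_binary_array.py | maxScoreIndices
-- ===== SOURCE A (Python) =====
-- from typing import List
--
-- def maxScoreIndices(nums: List[int]) -> List[int]:
--     distinct_indices = []
--
--     left_score = []
--     right_score= []
--
--     left_score.append(0)
--     right_score.append(0)
--     zeroes = 0
--     ones = 0
--     for i in range(0, len(nums)):
--         if nums[i] == 0:
--             zeroes += 1
--             left_score.append(zeroes)
--         else:
--             left_score.append(zeroes)
--
--     for i in range(len(nums)-1, -1, -1):
--         if nums[i] == 1: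
--             ones += 1
--             right_score.append(ones)
--         else:
--             right_score.append(ones)
--
--     right_score = right_score[::-1]
--     highest_score = 0
--
--     for i in range(len(nums) + 1):
--         stage_score = left_score[i] + right_score[i]
--         if stage_score > highest_score:
--             highest_score = stage_score
--             distinct_indices = [i]  # Reset the list with the new highest score index
--         elif stage_score == highest_score:
--             distinct_indices.append(i)  # Append if score is the same as the highest score
--
--     return distinct_indices
-- ===== SOURCE B (Python) =====
-- from typing import List
--
-- def maxScoreIndices(nums: List[int]) -> List[int]:
--     # Single rolling score: start with all elements on the right, move the
--     # split left-to-right, adjusting the score by +1 per zero / -1 per one.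
--     score = sum(1 for x in nums if x == 1)
--     best = 0
--     res = []
--     i = 0
--     for x in nums:
--         if score > best:
--             best = score
--             res = [i]
--         elif score == best:
--             res.append(i)
--         if x == 0:
--             score += 1
--         elif x == 1:
--             score -= 1
--         i += 1
--     if score > best:
--         res = [i]
--     elif score == best:
--         res.append(i)
--     return res
-- ===== Notes on version B (the rewrite author's own statement) =====
-- stated objective: simpler
-- what changed: Replaces A's three passes (prefix-zero array, backward suffix-one array, list reversal, then a combining scan over both arrays) by a single forward pass maintaining one rolling score, started at the count of ones and updated by +1 per zero / -1 per one after each split is evaluated.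
import Mathlib
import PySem

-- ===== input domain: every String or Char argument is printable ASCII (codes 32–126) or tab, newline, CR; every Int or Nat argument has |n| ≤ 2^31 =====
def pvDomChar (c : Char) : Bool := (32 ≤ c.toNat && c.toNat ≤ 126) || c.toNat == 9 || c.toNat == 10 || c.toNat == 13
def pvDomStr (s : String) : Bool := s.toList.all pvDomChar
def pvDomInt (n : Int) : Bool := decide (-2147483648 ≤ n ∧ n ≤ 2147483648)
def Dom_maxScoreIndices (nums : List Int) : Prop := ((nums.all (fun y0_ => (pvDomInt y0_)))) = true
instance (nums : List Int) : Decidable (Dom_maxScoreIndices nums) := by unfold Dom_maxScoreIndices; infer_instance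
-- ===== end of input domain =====

-- B replaces A's two prefix/suffix arrays, list reversal and combining pass
-- by a single rolling score updated while scanning once (objective: simpler).

-- ===== PORT A =====
def maxScoreIndices (nums : List Int) : List Int :=
  let n : Int := nums.length
  -- first loop: build left_score (prefix zero counts), carrying `zeroes`
  let ls := (PySem.List.pyRange 0 n 1).foldl
      (fun (st : List Int × Int) i =>
        if PySem.List.pyGetD nums i 0 = 0 then (st.1 ++ [st.2 + 1], st.2 + 1)
        else (st.1 ++ [st.2], st.2)) ([0], 0)
  -- second loop: build right_score downwards, carrying `ones`
  let rs := (PySem.List.pyRange (n - 1) (-1) (-1)).foldl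
      (fun (st : List Int × Int) i =>
        if PySem.List.pyGetD nums i 0 = 1 then (st.1 ++ [st.2 + 1], st.2 + 1)
        else (st.1 ++ [st.2], st.2)) ([0], 0)
  let right := rs.1.reverse          -- right_score = right_score[::-1]
  -- third loop: pick the indices of the highest stage score
  let fin := (PySem.List.pyRange 0 (n + 1) 1).foldl
      (fun (st : Int × List Int) i =>
        let stage := PySem.List.pyGetD ls.1 i 0 + PySem.List.pyGetD right i 0
        if stage > st.1 then (stage, [i])
        else if stage = st.1 then (st.1, st.2 ++ [i])
        else st) (0, [])
  fin.2

-- ===== PORT B =====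
-- the for-x-in-nums loop of Source B (state: i, rolling score, best, res)
def bGo : List Int → Int → Int → Int → List Int → List Int
  | [], i, score, best, res =>
      if score > best then [i] else if score = best then res ++ [i] else res
  | x :: rest, i, score, best, res =>
      let st := if score > best then (score, ([i] : List Int))
                else if score = best then (best, res ++ [i])
                else (best, res)
      let score' := if x = 0 then score + 1 else if x = 1 then score - 1 else score
      bGo rest (i + 1) score' st.1 st.2

def maxScoreIndices_alt (nums : List Int) : List Int :=
  bGo nums 0 (nums.foldl (fun acc x => if x = 1 then acc + 1 else acc) 0) 0 []

-- ===== PRECONDITION & SPEC =====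
def Spec_maxScoreIndices (nums : List Int) (out : List Int) : Prop := out = maxScoreIndices_alt nums
instance (nums : List Int) (out : List Int) : Decidable (Spec_maxScoreIndices nums out) := by unfold Spec_maxScoreIndices; infer_instance

-- ===== CLAIM (what is proved, stated in full; the proofs are below) =====
def Claim_equal_maxScoreIndices : Prop := ∀ (nums : List Int), Dom_maxScoreIndices nums → Spec_maxScoreIndices nums (maxScoreIndices nums)

-- ===== LEMMAS AND PROOFS =====

-- number of zeros / ones in a list, as Int
def Zc (l : List Int) : Int := (l.countP (fun x => x == 0) : Int)
def Oc (l : List Int) : Int := (l.countP (fun x => x == 1) : Int)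

-- generic selection loop over an (index, score) stream
def selP : List (Int × Int) → Int → List Int → List Int
  | [], _, res => res
  | (i, s) :: rest, best, res =>
      if s > best then selP rest s [i]
      else if s = best then selP rest best (res ++ [i])
      else selP rest best res

-- the stream of rolling scores B walks through
def stagesFrom : Int → List Int → List Int
  | s, [] => [s]
  | s, x :: rest => s :: stagesFrom (if x = 0 then s + 1 else if x = 1 then s - 1 else s) rest

def enum : Int → List Int → List (Int × Int)
  | _, [] => []
  | j, s :: rest => (j, s) :: enum (j + 1) rest

lemma sum_ones_foldl (l : List Int) : ∀ a : Int,
    l.foldl (fun acc x => if x = 1 then acc + 1 else acc) a = a + Oc l := by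
  induction l with
  | nil => intro a; simp [Oc]
  | cons x rest ih =>
    intro a
    simp only [List.foldl_cons, ih, Oc, List.countP_cons]
    by_cases hx : x = 1
    · simp [hx]; ring
    · simp [hx]

lemma bGo_eq_selP : ∀ (l : List Int) (i score best : Int) (res : List Int),
    bGo l i score best res = selP (enum i (stagesFrom score l)) best res := by
  intro l
  induction l with
  | nil => intro i score best res; simp [bGo, stagesFrom, enum, selP]
  | cons x rest ih =>
    intro i score best res
    simp only [bGo, stagesFrom, enum, selP]
    by_cases h1 : score > best
    · simp [h1, ih]
    · by_cases h2 : score = best <;> simp [h1, h2, ih]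

lemma foldl_selP (g : Int → Int) : ∀ (idxs : List Int) (b : Int) (res : List Int),
    (idxs.foldl (fun (st : Int × List Int) i =>
        if g i > st.1 then (g i, [i])
        else if g i = st.1 then (st.1, st.2 ++ [i])
        else st) (b, res)).2
      = selP (idxs.map (fun i => (i, g i))) b res := by
  intro idxs
  induction idxs with
  | nil => intro b res; simp [selP]
  | cons i rest ih =>
    intro b res
    simp only [List.foldl_cons, List.map_cons, selP]
    by_cases h1 : g i > b
    · simp [h1, ih]
    · by_cases h2 : g i = b <;> simp [h1, h2, ih]

lemma stagesFrom_eq (l : List Int) : ∀ s : Int,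
    stagesFrom s l
      = (List.range (l.length + 1)).map (fun k => s + Zc (l.take k) - Oc (l.take k)) := by
  induction l with
  | nil => intro s; simp [stagesFrom, Zc, Oc]
  | cons x rest ih =>
    intro s
    rw [stagesFrom, ih]
    conv_rhs => rw [show (x :: rest).length + 1 = (rest.length + 1) + 1 by simp,
      List.range_succ_eq_map]
    simp only [List.map_cons, List.map_map]
    refine List.cons_eq_cons.mpr ⟨by simp [Zc, Oc], ?_⟩
    apply List.map_congr_left
    intro k _
    simp only [Function.comp, List.take_succ_cons, Zc, Oc, List.countP_cons]
    by_cases h0 : x = 0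
    · simp [h0]; ring
    · by_cases h1 : x = 1
      · simp [h1]; ring
      · simp [h0, h1]

lemma enum_map_range (m : Nat) : ∀ (j : Int) (f : Nat → Int),
    enum j ((List.range m).map f)
      = (List.range m).map (fun k : Nat => ((j + (k : Int), f k) : Int × Int)) := by
  induction m with
  | zero => intro j f; simp [enum]
  | succ m ih =>
    intro j f
    rw [List.range_succ_eq_map]
    simp only [List.map_cons, List.map_map, enum, ih]
    refine List.cons_eq_cons.mpr ⟨by simp, ?_⟩
    apply List.map_congr_left
    intro k _
    simp only [Function.comp]
    refine Prod.ext ?_ rfl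
    push_cast; ring

lemma reverse_map_range {α : Type} (m : Nat) (f : Nat → α) :
    ((List.range m).map f).reverse = (List.range m).map (fun k => f (m - 1 - k)) := by
  apply List.ext_getElem
  · simp
  · intro i h1 h2
    simp only [List.getElem_reverse, List.getElem_map, List.getElem_range,
      List.length_map, List.length_range] at h1 h2 ⊢

lemma leftFold_inv (nums : List Int) : ∀ m : Nat, m ≤ nums.length →
    (List.map (Nat.cast : Nat → Int) (List.range m)).foldl
      (fun (st : List Int × Int) i =>
        if PySem.List.pyGetD nums i 0 = 0 then (st.1 ++ [st.2 + 1], st.2 + 1)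
        else (st.1 ++ [st.2], st.2)) ([0], 0)
    = ((List.range (m + 1)).map (fun k => Zc (nums.take k)), Zc (nums.take m)) := by
  intro m
  induction m with
  | zero => intro _; simp [Zc]
  | succ m ih =>
    intro hm
    have hm' : m < nums.length := by omega
    simp only [List.range_succ, List.map_append, List.map_cons, List.map_nil,
      List.foldl_append, List.foldl_cons, List.foldl_nil]
    rw [ih (by omega)]
    simp only [PySem.List.pyGetD_natCast, List.getD_eq_getElem nums 0 hm']
    have htake : Zc (nums.take (m + 1)) = Zc (nums.take m) + (if nums[m] = 0 then 1 else 0) := by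
      rw [List.take_add_one, List.getElem?_eq_getElem hm']
      simp only [Zc, Option.toList_some, List.countP_append, List.countP_cons,
        List.countP_nil]
      by_cases h : nums[m] = 0 <;> simp [h]
    by_cases h : nums[m] = 0
    · simp only [h, htake]
      rw [List.range_succ, List.map_append]
      simp
    · simp only [htake]
      rw [List.range_succ, List.map_append]
      simp [h]

lemma rightFold_inv (nums : List Int) : ∀ m : Nat, m ≤ nums.length →
    ((List.range m).map (fun k : Nat => ((nums.length : Int) - 1 - (k : Int)))).foldl
      (fun (st : List Int × Int) i =>
        if PySem.List.pyGetD nums i 0 = 1 then (st.1 ++ [st.2 + 1], st.2 + 1)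
        else (st.1 ++ [st.2], st.2)) ([0], 0)
    = ((List.range (m + 1)).map (fun k => Oc (nums.drop (nums.length - k))),
        Oc (nums.drop (nums.length - m))) := by
  intro m
  induction m with
  | zero => intro _; simp [Oc]
  | succ m ih =>
    intro hm
    have hidx : nums.length - (m + 1) < nums.length := by omega
    simp only [List.range_succ, List.map_append, List.map_cons, List.map_nil,
      List.foldl_append, List.foldl_cons, List.foldl_nil]
    rw [ih (by omega)]
    have hcast : ((nums.length : Int) - 1 - m) = ((nums.length - (m + 1) : Nat) : Int) := by
      push_cast [Nat.cast_sub (by omega : m + 1 ≤ nums.length)]; ring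
    rw [hcast]
    simp only [PySem.List.pyGetD_natCast, List.getD_eq_getElem nums 0 hidx]
    have hdrop : Oc (nums.drop (nums.length - (m + 1)))
        = Oc (nums.drop (nums.length - m)) + (if nums[nums.length - (m + 1)] = 1 then 1 else 0) := by
      rw [List.drop_eq_getElem_cons hidx]
      have : nums.length - (m + 1) + 1 = nums.length - m := by omega
      rw [this]
      simp only [Oc, List.countP_cons]
      by_cases h : nums[nums.length - (m + 1)] = 1 <;> simp [h]
    by_cases h : nums[nums.length - (m + 1)] = 1
    · simp only [h, hdrop]
      rw [List.range_succ, List.map_append]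
      simp
    · simp only [hdrop]
      rw [List.range_succ, List.map_append]
      simp [h]

lemma oc_split (nums : List Int) (k : Nat) :
    Oc nums = Oc (nums.take k) + Oc (nums.drop k) := by
  conv_lhs => rw [← List.take_append_drop k nums]
  simp only [Oc, List.countP_append]
  push_cast
  ring

lemma main_eq (nums : List Int) : maxScoreIndices nums = maxScoreIndices_alt nums := by
  simp only [maxScoreIndices, maxScoreIndices_alt]
  rw [sum_ones_foldl nums 0, zero_add, bGo_eq_selP, stagesFrom_eq, enum_map_range]
  rw [PySem.List.pyRange_zero_natCast nums.length]
  rw [leftFold_inv nums nums.length (le_refl _)]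
  rw [PySem.List.pyRange_neg_one]
  rw [show (((nums.length : Int) - 1) - (-1)).toNat = nums.length by omega]
  rw [rightFold_inv nums nums.length (le_refl _)]
  rw [show (nums.length : Int) + 1 = ((nums.length + 1 : Nat) : Int) by push_cast; ring,
      PySem.List.pyRange_zero_natCast (nums.length + 1)]
  have hright : ((List.range (nums.length + 1)).map
        (fun k => Oc (nums.drop (nums.length - k)))).reverse
      = (List.range (nums.length + 1)).map (fun k => Oc (nums.drop k)) := by
    rw [reverse_map_range]
    apply List.map_congr_left
    intro k hk
    rw [List.mem_range] at hk
    congr 2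
    omega
  rw [hright]
  rw [foldl_selP (fun i =>
      PySem.List.pyGetD ((List.range (nums.length + 1)).map (fun k => Zc (nums.take k))) i 0
      + PySem.List.pyGetD ((List.range (nums.length + 1)).map (fun k => Oc (nums.drop k))) i 0)]
  rw [List.map_map]
  congr 1
  apply List.map_congr_left
  intro k hk
  rw [List.mem_range] at hk
  simp only [Function.comp, PySem.List.pyGetD_natCast,
    PySem.List.getD_map_range _ _ _ _ hk]
  refine Prod.ext (by simp) ?_
  have hs := oc_split nums k
  omega

-- ===== VERDICT (by name: the statement is the Claim_ definition above) =====
theorem maxScoreIndices_spec : Claim_equal_maxScoreIndices := by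
  intro nums _
  unfold Spec_maxScoreIndices
  exact main_eq nums
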